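-- pv_equiv track=rewrite | github.com/vadim-zyamalov/advent-of-code | 2020/day-24/part1.py | parse
-- ===== SOURCE A (Python) =====
-- def parse(line: str) -> list[str]:
--     result = []
--     tmp = ""
--
--     for ch in line:
--         match ch:
--             case "e" | "w":
--                 result.append(tmp + ch)
--                 tmp = ""
--             case "n" | "s":
--                 tmp = ch
--             case _:
--                 raise ValueError()
--
--     return result
-- ===== SOURCE B (Python) =====
-- def parse(line: str) -> list[str]:
--     for ch in line:
--         if ch not in "nsew":
--             raise ValueError()
--     result = []
--     i = 0
--     n = len(line)
--     while i < n:
--         c = line[i]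
--         if c in "ew":
--             result.append(c)
--             i += 1
--         elif i + 1 < n and line[i + 1] in "ew":
--             result.append(line[i:i + 2])
--             i += 2
--         else:
--             i += 1
--     return result
-- ===== Notes on version B (the rewrite author's own statement) =====
-- stated objective: alternative
-- what changed: Replaces A's overwrite-then-reset accumulator fold with an upfront validation pass followed by a lookahead two-pointer scan that emits each e/w together with the character immediately before it when that is n/s.
import Mathlib
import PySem

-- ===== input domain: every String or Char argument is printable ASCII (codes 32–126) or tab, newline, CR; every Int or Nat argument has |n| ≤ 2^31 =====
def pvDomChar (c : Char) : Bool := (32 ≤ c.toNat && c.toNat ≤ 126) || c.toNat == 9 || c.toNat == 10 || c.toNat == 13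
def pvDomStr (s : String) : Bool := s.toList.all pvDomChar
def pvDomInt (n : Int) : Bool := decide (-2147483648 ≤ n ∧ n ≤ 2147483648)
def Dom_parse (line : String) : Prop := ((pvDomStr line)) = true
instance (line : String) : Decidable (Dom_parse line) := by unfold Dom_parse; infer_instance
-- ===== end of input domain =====

-- B replaces A's overwrite-then-reset accumulator loop with a validation pass plus a
-- lookahead two-pointer scan; equal output on every line of 'nsew' characters (alternative).


-- ===== PORT A =====
-- A's loop over the characters with state (result, tmp); 'none' marks the ValueError on
-- a character outside 'nsew' (those inputs are excluded by Pre_parse).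
def parseAux (cs : List Char) (tmp : String) : Option (List String) :=
  match cs with
  | [] => some []
  | c :: rest =>
    if c = 'e' ∨ c = 'w' then (parseAux rest "").map (fun r => tmp.push c :: r)
    else if c = 'n' ∨ c = 's' then parseAux rest (String.singleton c)
    else none

def parse (line : String) : List String := (parseAux line.toList "").getD []

-- ===== PORT B =====
-- B's while loop with index i and lookahead at i+1, as structural recursion on the
-- character list (exact for the i/i+1/i+2 stepping of Source B).
def scanTokens : List Char → List String
  | [] => []
  | c :: rest =>
    if c = 'e' ∨ c = 'w' then String.ofList [c] :: scanTokens rest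
    else match rest with
      | [] => []
      | d :: rest2 =>
        if d = 'e' ∨ d = 'w' then String.ofList [c, d] :: scanTokens rest2
        else scanTokens (d :: rest2)

-- B's validation pass; on a foreign character Source B raises ValueError (outside Pre_parse).
def parse_alt (line : String) : List String :=
  if line.toList.all (fun c => c == 'n' || c == 's' || c == 'e' || c == 'w')
  then scanTokens line.toList else []

-- ===== PRECONDITION & SPEC =====
-- Pre_parse: exactly the lines on which A returns (any character outside 'nsew' raises ValueError).
def Pre_parse (line : String) : Prop :=
  (line.toList.all (fun c => c == 'n' || c == 's' || c == 'e' || c == 'w')) = true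
instance (line : String) : Decidable (Pre_parse line) := by unfold Pre_parse; infer_instance

def pvWitness_parse : String := ("esenee")

def Spec_parse (line : String) (out : List String) : Prop := out = parse_alt line
instance (line : String) (out : List String) : Decidable (Spec_parse line out) := by unfold Spec_parse; infer_instance

-- ===== CLAIM (what is proved, stated in full; the proofs are below) =====
def Claim_equal_parse : Prop := ∀ (line : String), Dom_parse line → Pre_parse line → Spec_parse line (parse line)

-- ===== LEMMAS AND PROOFS =====

-- A's loop with empty tmp equals B's scan, and with tmp = a pending n/s it equals B's
-- scan restarted at that pending character.
theorem parseAux_scan (cs : List Char)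
    (h : ∀ c ∈ cs, c = 'n' ∨ c = 's' ∨ c = 'e' ∨ c = 'w') :
    parseAux cs "" = some (scanTokens cs) ∧
      ∀ c, (c = 'n' ∨ c = 's') →
        parseAux cs (String.singleton c) = some (scanTokens (c :: cs)) := by
  induction cs with
  | nil =>
    refine ⟨rfl, ?_⟩
    intro c hc
    rcases hc with h | h <;> subst h <;> rfl
  | cons d rest ih =>
    have hrest : ∀ c ∈ rest, c = 'n' ∨ c = 's' ∨ c = 'e' ∨ c = 'w' := by
      intro c hc; exact h c (List.mem_cons_of_mem _ hc)
    obtain ⟨ih1, ih2⟩ := ih hrest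
    have hd := h d (by simp)
    rcases hd with hd | hd | hd | hd <;> subst hd <;> refine ⟨?_, ?_⟩
    -- d = 'n' : A stores tmp := 'n'; B either pairs 'n' with the lookahead or skips it
    · have e1 : parseAux ('n' :: rest) "" = parseAux rest (String.singleton 'n') := by
        simp [parseAux]
      rw [e1, ih2 'n' (Or.inl rfl)]
    · intro c hc
      have e1 : parseAux ('n' :: rest) (String.singleton c) =
          parseAux rest (String.singleton 'n') := by simp [parseAux]
      have e2 : scanTokens (c :: 'n' :: rest) = scanTokens ('n' :: rest) := by
        conv_lhs => unfold scanTokens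
        rcases hc with h | h <;> subst h <;> simp
      rw [e1, ih2 'n' (Or.inl rfl), e2]
    -- d = 's' : symmetric
    · have e1 : parseAux ('s' :: rest) "" = parseAux rest (String.singleton 's') := by
        simp [parseAux]
      rw [e1, ih2 's' (Or.inr rfl)]
    · intro c hc
      have e1 : parseAux ('s' :: rest) (String.singleton c) =
          parseAux rest (String.singleton 's') := by simp [parseAux]
      have e2 : scanTokens (c :: 's' :: rest) = scanTokens ('s' :: rest) := by
        conv_lhs => unfold scanTokens
        rcases hc with h | h <;> subst h <;> simp
      rw [e1, ih2 's' (Or.inr rfl), e2]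
    -- d = 'e' : both emit a token ending in 'e'
    · have e1 : parseAux ('e' :: rest) "" =
          (parseAux rest "").map (fun r => "".push 'e' :: r) := by simp [parseAux]
      have e2 : scanTokens ('e' :: rest) = String.ofList ['e'] :: scanTokens rest := by
        conv_lhs => unfold scanTokens
        simp
      rw [e1, ih1, e2]
      simp
    · intro c hc
      have e1 : parseAux ('e' :: rest) (String.singleton c) =
          (parseAux rest "").map (fun r => (String.singleton c).push 'e' :: r) := by
        simp [parseAux]
      have e2 : scanTokens (c :: 'e' :: rest) = String.ofList [c, 'e'] :: scanTokens rest := by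
        conv_lhs => unfold scanTokens
        rcases hc with h | h <;> subst h <;> simp
      rw [e1, ih1, e2]
      rcases hc with h | h <;> subst h <;> simp <;> decide
    -- d = 'w' : symmetric
    · have e1 : parseAux ('w' :: rest) "" =
          (parseAux rest "").map (fun r => "".push 'w' :: r) := by simp [parseAux]
      have e2 : scanTokens ('w' :: rest) = String.ofList ['w'] :: scanTokens rest := by
        conv_lhs => unfold scanTokens
        simp
      rw [e1, ih1, e2]
      simp
    · intro c hc
      have e1 : parseAux ('w' :: rest) (String.singleton c) =
          (parseAux rest "").map (fun r => (String.singleton c).push 'w' :: r) := by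
        simp [parseAux]
      have e2 : scanTokens (c :: 'w' :: rest) = String.ofList [c, 'w'] :: scanTokens rest := by
        conv_lhs => unfold scanTokens
        rcases hc with h | h <;> subst h <;> simp
      rw [e1, ih1, e2]
      rcases hc with h | h <;> subst h <;> simp <;> decide

-- ===== VERDICT (by name: the statement is the Claim_ definition above) =====
theorem parse_spec : Claim_equal_parse := by
  intro line _ hpre
  unfold Spec_parse parse parse_alt
  have hprop : ∀ c ∈ line.toList, c = 'n' ∨ c = 's' ∨ c = 'e' ∨ c = 'w' := by
    have := hpre
    simp only [Pre_parse, List.all_eq_true] at this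
    intro c hc
    have h := this c hc
    simp only [Bool.or_eq_true, beq_iff_eq] at h
    tauto
  rw [hpre, if_pos rfl, (parseAux_scan line.toList hprop).1]
  rfl
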